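-- pv_equiv track=rewrite | github.com/pizzaboynizza/class_whatever | code/michaelh/python_labs/mini_capstone/test.py | dict_merge_intersecting
-- ===== SOURCE A (Python) =====
-- def intersecting_tuples(org_list):
--     '''Takes a list of tupules and returns True if two of them intersect.'''
--     for i, tup in enumerate(org_list):
--         for j, other_tup in enumerate(org_list):
--             if set(tup) & set(other_tup) and i != j:
--                 return True
--     return False
--
-- def dict_merge_intersecting(org_dict):
--     '''Takes a dictionary org_dict and adds the integer values if the
--     tuple keys intersect.'''
--     keys = list(org_dict.keys())
--     new_dict = org_dict.copy()
--     while intersecting_tuples(keys):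
--         break_flag = False
--         for i, key in enumerate(keys):
--             for j, other_key in enumerate(keys):
--                 if set(key) & set(other_key) and i != j:
--                     num = new_dict[key] + new_dict[other_key]
--                     new_dict.pop(key)
--                     new_dict.pop(other_key)
--                     new_dict[tuple(set(key).union(set(other_key)))] = num
--                     break_flag = True
--                     break
--             if break_flag:
--                 break
--         keys = list(new_dict.keys())
--     return new_dict
-- ===== SOURCE B (Python) =====
-- def dict_merge_intersecting(org_dict):
--     '''Takes a dictionary org_dict and adds the integer values if the
--     tuple keys intersect.
--
--     Re-implementation: each round indexes every element to the set of key
--     positions containing it (one pass), then reads the first mergeable key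
--     and its earliest partner straight off that index instead of scanning
--     all key pairs and intersecting their element sets.'''
--     new_dict = dict(org_dict)
--     while True:
--         keys = list(new_dict)
--         occ = {}
--         for i, key in enumerate(keys):
--             for e in key:
--                 occ.setdefault(e, set()).add(i)
--         pair = None
--         for i, key in enumerate(keys):
--             partners = [j for e in key for j in occ[e] if j != i]
--             if partners:
--                 pair = (i, min(partners))
--                 break
--         if pair is None:
--             return new_dict
--         a, b = keys[pair[0]], keys[pair[1]]
--         num = new_dict.pop(a) + new_dict.pop(b)
--         new_dict[tuple(set(a) | set(b))] = num
-- ===== Notes on version B (the rewrite author's own statement) =====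
-- stated objective: alternative
-- what changed: Each round builds an element-to-key-positions index in one pass and reads the first mergeable key and its smallest partner straight off it, replacing A's intersecting_tuples pre-scan plus break-flag nested pairwise set-intersection search (two quadratic double loops per round); per round the pair search drops from O(n^2*k) set intersections to one O(n*k) indexing pass, though rebuilding the index each round can lose to A's early exit when a pair sits at the front.
import Mathlib
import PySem

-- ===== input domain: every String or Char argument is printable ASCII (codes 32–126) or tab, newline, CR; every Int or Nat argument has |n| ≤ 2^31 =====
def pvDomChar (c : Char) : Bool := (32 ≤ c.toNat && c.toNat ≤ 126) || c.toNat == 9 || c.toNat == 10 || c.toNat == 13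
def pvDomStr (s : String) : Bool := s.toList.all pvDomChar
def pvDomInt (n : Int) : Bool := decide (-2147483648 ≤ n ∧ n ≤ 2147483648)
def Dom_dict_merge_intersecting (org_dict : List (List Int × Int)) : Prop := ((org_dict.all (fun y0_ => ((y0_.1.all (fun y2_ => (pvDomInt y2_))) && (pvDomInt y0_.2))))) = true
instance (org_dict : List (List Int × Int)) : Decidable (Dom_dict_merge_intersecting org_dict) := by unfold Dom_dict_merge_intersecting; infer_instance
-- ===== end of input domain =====

-- B replaces A's per-round pair search (an intersecting_tuples pre-scan plus a nested
-- pairwise set-intersection scan, both quadratic in the number of keys) by one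
-- element→key-positions index built per round, off which the first mergeable pair is read.
--
-- Both Pythons build each merged key with `tuple(set(key).union(set(other_key)))` (A) /
-- `tuple(set(a) | set(b))` (B): the SAME CPython construct, whose element order is CPython's
-- set-table iteration order, which PySem does not model. Each port carries its own hand port
-- of CPython 3.11 setobject.c (set_add_entry / set_table_resize / set_insert_clean /
-- set_merge), exact for int elements with |n| ≤ 2^31 and no deletions (hash(n) = n except
-- hash(-1) = -2); the probe loops carry fuel that is never exhausted on a real table (a table
-- always has a free slot), with a total fallback.

-- ===== PORT A =====
-- A-side model of the CPython set table (structure + probe-slot lists + fuel recursion)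

def pvHash (x : Int) : Int := if x = -1 then -2 else x

structure PvSetObj where
  mask : Nat
  table : List (Option Int)
  fill : Nat
  used : Nat
deriving Repr, DecidableEq

def pvEmptySet : PvSetObj := ⟨7, List.replicate 8 none, 0, 0⟩

def pvIterOrder (s : PvSetObj) : List Int := s.table.filterMap id

-- slots probed linearly from i: i itself plus the 9 following ones when i+9 ≤ mask
def pvLinSlots (i mask : Nat) : List Nat :=
  i :: (if i + 9 ≤ mask then (List.range 9).map (fun j => i + j + 1) else [])

def pvNextI (i mask perturb : Nat) : Nat := (i * 5 + 1 + (perturb >>> 5)) % (mask + 1)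

-- set_insert_clean: first empty slot along the probe sequence
def pvCleanScan (t : List (Option Int)) : List Nat → Option Nat
  | [] => none
  | e :: r => if t.getD e (some 0) = none then some e else pvCleanScan t r

def pvCleanFind (t : List (Option Int)) (mask : Nat) (i perturb : Nat) : Nat → Option Nat
  | 0 => none
  | fuel + 1 =>
    match pvCleanScan t (pvLinSlots i mask) with
    | some e => some e
    | none => pvCleanFind t mask (pvNextI i mask perturb) (perturb >>> 5) fuel

-- total fallback (unreachable on a real table: fuel suffices)
def pvFallback (t : List (Option Int)) (key : Int) : List (Option Int) :=
  match t.findIdx? (· = none) with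
  | some e => t.set e (some key)
  | none => t ++ [some key]

def pvIdx0 (h : Int) (mask : Nat) : Nat := (h % ((mask : Int) + 1)).toNat
def pvPerturb0 (h : Int) : Nat := (h % (2 ^ 64 : Int)).toNat

def pvInsertClean (t : List (Option Int)) (mask : Nat) (key : Int) : List (Option Int) :=
  match pvCleanFind t mask (pvIdx0 (pvHash key) mask) (pvPerturb0 (pvHash key)) (mask + 80) with
  | some e => t.set e (some key)
  | none => pvFallback t key

-- newsize = 8; while newsize <= minused: newsize <<= 1
def pvGrow (cur minused : Nat) : Nat → Nat
  | 0 => cur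
  | fuel + 1 => if cur ≤ minused then pvGrow (cur * 2) minused fuel else cur

def pvResize (s : PvSetObj) (minused : Nat) : PvSetObj :=
  let newsize := pvGrow 8 minused (minused + 2)
  let t := (pvIterOrder s).foldl (fun t k => pvInsertClean t (newsize - 1) k)
             (List.replicate newsize none)
  ⟨newsize - 1, t, s.used, s.used⟩

-- set_add_entry probe: some (some e) = empty slot e, some none = key already present
def pvScanSlots (t : List (Option Int)) (key : Int) : List Nat → Option (Option Nat)
  | [] => none
  | e :: r =>
    match t[e]? with
    | none => pvScanSlots t key r        -- out of range: never happens on a real probe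
    | some none => some (some e)
    | some (some k) => if k == key then some none else pvScanSlots t key r

def pvAddFind (t : List (Option Int)) (mask : Nat) (key : Int) (i perturb : Nat) :
    Nat → Option (Option Nat)
  | 0 => none
  | fuel + 1 =>
    match pvScanSlots t key (pvLinSlots i mask) with
    | some r => some r
    | none => pvAddFind t mask key (pvNextI i mask perturb) (perturb >>> 5) fuel

def pvAddKey (s : PvSetObj) (key : Int) : PvSetObj :=
  match pvAddFind s.table s.mask key (pvIdx0 (pvHash key) s.mask)
      (pvPerturb0 (pvHash key)) (s.mask + 80) with
  | some none => s                        -- already present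
  | some (some e) =>
    let s' : PvSetObj := ⟨s.mask, s.table.set e (some key), s.fill + 1, s.used + 1⟩
    if s'.fill * 5 ≥ s.mask * 3 then
      pvResize s' (if s'.used ≤ 50000 then s'.used * 4 else s'.used * 2)
    else s'
  | none =>                               -- fuel exhausted: unreachable; still record the key
    if (some key) ∈ s.table then s
    else ⟨s.mask, pvFallback s.table key, s.fill + 1, s.used + 1⟩

def pvSetFromList (xs : List Int) : PvSetObj := xs.foldl pvAddKey pvEmptySet

-- set_merge(so, other) (other a real set: fill = used, no dummies)
def pvMergeSet (so other : PvSetObj) : PvSetObj :=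
  let so := if (so.fill + other.used) * 5 ≥ so.mask * 3 then
              pvResize so ((so.used + other.used) * 2) else so
  if so.fill = 0 ∧ so.mask = other.mask then
    ⟨so.mask, other.table, other.fill, other.used⟩
  else if so.fill = 0 then
    ⟨so.mask, (pvIterOrder other).foldl (fun t k => pvInsertClean t so.mask k) so.table,
      other.used, other.used⟩
  else
    (pvIterOrder other).foldl pvAddKey so

-- tuple(set(key).union(set(other_key))): copy set(key), merge set(other_key)
def pvUnionOrder (a b : List Int) : List Int :=
  pvIterOrder (pvMergeSet (pvMergeSet pvEmptySet (pvSetFromList a)) (pvSetFromList b))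

-- bool(set(t) & set(u)): the intersection is non-empty
def pvSetAnd (t u : List Int) : Bool :=
  (PySem.Set.inter (PySem.Set.ofList t) (PySem.Set.ofList u)) != []

def intersecting_tuples (org_list : List (List Int)) : Bool :=
  (PySem.List.enumerate org_list).any (fun it =>
    (PySem.List.enumerate org_list).any (fun ju => pvSetAnd it.2 ju.2 && it.1 != ju.1))

-- the doubly-broken for-loops of A's body: first (key, other_key) with intersecting sets
def pvFindPairA (keys : List (List Int)) : Option (List Int × List Int) :=
  (PySem.List.enumerate keys).findSome? (fun ik =>
    (PySem.List.enumerate keys).findSome? (fun ju =>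
      if pvSetAnd ik.2 ju.2 && ik.1 != ju.1 then some (ik.2, ju.2) else none))

-- the while loop; fuel: each merge shrinks the dict, org.length + 1 always suffices
def pvALoop : Nat → PySem.Dict (List Int) Int → PySem.Dict (List Int) Int
  | 0, d => d
  | fuel + 1, d =>
    let keys := d.keys
    if intersecting_tuples keys then
      match pvFindPairA keys with
      | some (k, k') =>
        -- new_dict[key] / new_dict[other_key]: both present (drawn from d.keys), KeyError unreachable
        let num := (d.get? k).getD 0 + (d.get? k').getD 0
        let d2 := (d.erase k).erase k'   -- the two .pop(...) calls (values already read)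
        pvALoop fuel (d2.insert (pvUnionOrder k k') num)
      | none => d                        -- unreachable: the while condition found a pair
    else d

def dict_merge_intersecting (org_dict : List (List Int × Int)) : List (List Int × Int) :=
  (pvALoop (org_dict.length + 1) (PySem.Dict.mk org_dict)).items

-- ===== PORT B =====
-- B-side model of the same CPython set table (state tuple (table, mask, used, fill),
-- counter-based linear runs, Option.orElse probe chaining); proved equal to A's model below.

abbrev HbSet := List (Option Int) × Nat × Nat × Nat

def hbHash (v : Int) : Int := cond (v == -1) (-2) v

def hbStep (ix msk pr : Nat) : Nat := (5 * ix + (pr >>> 5) + 1) % (msk + 1)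

def hbAt (tb : List (Option Int)) (spot : Nat) : Option (Option Int) := tb[spot]?

def hbRunAdd (tb : List (Option Int)) (v : Int) : Nat → Nat → Option (Option Nat)
  | _, 0 => Option.none
  | spot, c + 1 =>
    (hbAt tb spot).elim (hbRunAdd tb v (spot + 1) c) (fun s =>
      s.elim (Option.some (Option.some spot)) (fun y =>
        cond (y == v) (Option.some Option.none) (hbRunAdd tb v (spot + 1) c)))

def hbFindAdd (tb : List (Option Int)) (msk : Nat) (v : Int) : Nat → Nat → Nat → Option (Option Nat)
  | 0, _, _ => Option.none
  | g + 1, ix, pr =>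
    (hbRunAdd tb v ix (if ix + 9 ≤ msk then 10 else 1)).orElse
      (fun _ => hbFindAdd tb msk v g (hbStep ix msk pr) (pr >>> 5))

def hbRunEmpty (tb : List (Option Int)) : Nat → Nat → Option Nat
  | _, 0 => Option.none
  | spot, c + 1 =>
    cond (hbAt tb spot == Option.some Option.none) (Option.some spot)
      (hbRunEmpty tb (spot + 1) c)

def hbFindEmpty (tb : List (Option Int)) (msk : Nat) : Nat → Nat → Nat → Option Nat
  | 0, _, _ => Option.none
  | g + 1, ix, pr =>
    (hbRunEmpty tb ix (if ix + 9 ≤ msk then 10 else 1)).orElse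
      (fun _ => hbFindEmpty tb msk g (hbStep ix msk pr) (pr >>> 5))

def hbPlace (v : Int) : List (Option Int) → List (Option Int)
  | [] => [Option.some v]
  | Option.none :: rest => Option.some v :: rest
  | Option.some y :: rest => Option.some y :: hbPlace v rest

def hbClean (tb : List (Option Int)) (msk : Nat) (v : Int) : List (Option Int) :=
  (hbFindEmpty tb msk (msk + 80) ((hbHash v % ((msk : Int) + 1)).toNat)
      ((hbHash v % 18446744073709551616).toNat)).elim
    (hbPlace v tb) (fun spot => List.set tb spot (Option.some v))

def hbNewSize (m : Nat) : Nat → Nat → Nat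
  | w, 0 => w
  | w, g + 1 => if m < w then w else hbNewSize m (w * 2) g

def hbResize (st : HbSet) (m : Nat) : HbSet :=
  let ns := hbNewSize m 8 (m + 2)
  (List.foldl (hbClean · (ns - 1) ·) (List.replicate ns Option.none) (List.filterMap id st.1),
    ns - 1, st.2.2.1, st.2.2.1)

def hbAdd (st : HbSet) (v : Int) : HbSet :=
  (hbFindAdd st.1 st.2.1 v (st.2.1 + 80) ((hbHash v % ((st.2.1 : Int) + 1)).toNat)
      ((hbHash v % 18446744073709551616).toNat)).elim
    (cond (List.contains st.1 (Option.some v)) st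
      (hbPlace v st.1, st.2.1, st.2.2.1 + 1, st.2.2.2 + 1))
    (fun s => s.elim st (fun spot =>
      if st.2.1 * 3 ≤ (st.2.2.2 + 1) * 5 then
        hbResize (List.set st.1 spot (Option.some v), st.2.1, st.2.2.1 + 1, st.2.2.2 + 1)
          (if st.2.2.1 + 1 ≤ 50000 then (st.2.2.1 + 1) * 4 else (st.2.2.1 + 1) * 2)
      else (List.set st.1 spot (Option.some v), st.2.1, st.2.2.1 + 1, st.2.2.2 + 1)))

def hbFrom (vs : List Int) : HbSet :=
  List.foldl hbAdd (List.replicate 8 Option.none, 7, 0, 0) vs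

def hbMerge (sa sb : HbSet) : HbSet :=
  let sc := if sa.2.1 * 3 ≤ (sa.2.2.2 + sb.2.2.1) * 5
            then hbResize sa ((sa.2.2.1 + sb.2.2.1) * 2) else sa
  if sc.2.2.2 = 0 then
    cond (sc.2.1 == sb.2.1) (sb.1, sc.2.1, sb.2.2.1, sb.2.2.2)
      (List.foldl (hbClean · sc.2.1 ·) sc.1 (List.filterMap id sb.1), sc.2.1, sb.2.2.1, sb.2.2.1)
  else List.foldl hbAdd sc (List.filterMap id sb.1)

-- tuple(set(a) | set(b)): copy set(a), merge set(b)
def hbUnion (xs ys : List Int) : List Int :=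
  List.filterMap id
    (hbMerge (hbMerge (List.replicate 8 Option.none, 7, 0, 0) (hbFrom xs)) (hbFrom ys)).1

-- occ: element -> set of key positions containing it (occ.setdefault(e, set()).add(i))
def bOcc (keys : List (List Int)) : PySem.Dict Int (PySem.Set Int) :=
  (PySem.List.enumerate keys).foldl
    (fun o ik => ik.2.foldl (fun o e => o.insert e (PySem.Set.add (o.getD e []) ik.1)) o)
    PySem.Dict.empty

-- first i whose partner list is non-empty, with its smallest partner (occ[e]: e always present)
def bFindPair (keys : List (List Int)) : Option (Int × Int) :=
  let occ := bOcc keys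
  (PySem.List.enumerate keys).findSome? (fun ik =>
    let partners := ik.2.flatMap (fun e => (occ.getD e []).filter (fun j => j != ik.1))
    if partners.isEmpty then none
    else some (ik.1, (PySem.List.min? partners (fun x => x)).getD 0))

-- the while True loop; each merge shrinks the dict, so org.length + 1 fuel always suffices
def pvBLoop : Nat → PySem.Dict (List Int) Int → PySem.Dict (List Int) Int
  | 0, d => d
  | fuel + 1, d =>
    match bFindPair d.keys with
    | none => d
    | some (i, j) =>
      let a := PySem.List.pyGetD d.keys i []   -- keys[pair[0]], index in range
      let b := PySem.List.pyGetD d.keys j []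
      -- num = new_dict.pop(a) + new_dict.pop(b): the second pop reads after the first erased
      let num := (d.get? a).getD 0 + ((d.erase a).get? b).getD 0
      pvBLoop fuel (((d.erase a).erase b).insert (hbUnion a b) num)

def dict_merge_intersecting_alt (org_dict : List (List Int × Int)) : List (List Int × Int) :=
  (pvBLoop (org_dict.length + 1) (PySem.Dict.mk org_dict)).items

-- ===== PRECONDITION & SPEC =====
-- Pre_ excludes association lists with a repeated key: a Python dict argument cannot contain one
-- (this narrows nothing of A's domain — every dict yields a duplicate-free item list).
def Pre_dict_merge_intersecting (org_dict : List (List Int × Int)) : Prop :=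
  (org_dict.map Prod.fst).Nodup
instance (org_dict : List (List Int × Int)) : Decidable (Pre_dict_merge_intersecting org_dict) := by
  unfold Pre_dict_merge_intersecting; infer_instance

def pvWitness_dict_merge_intersecting : (List (List Int × Int)) :=
  [([1, 2], 3), ([2, 5], 4), ([9], 7)]

def Spec_dict_merge_intersecting (org_dict : List (List Int × Int)) (out : List (List Int × Int)) : Prop :=
  out = dict_merge_intersecting_alt org_dict
instance (org_dict : List (List Int × Int)) (out : List (List Int × Int)) : Decidable (Spec_dict_merge_intersecting org_dict out) := by
  unfold Spec_dict_merge_intersecting; infer_instance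

-- ===== CLAIM (what is proved, stated in full; the proofs are below) =====
def Claim_equal_dict_merge_intersecting : Prop := ∀ (org_dict : List (List Int × Int)), Dom_dict_merge_intersecting org_dict → Pre_dict_merge_intersecting org_dict → Spec_dict_merge_intersecting org_dict (dict_merge_intersecting org_dict)

-- ===== LEMMAS AND PROOFS =====

-- ---- the two CPython-set models compute the same union tuple ----

theorem hb_hash (x : Int) : hbHash x = pvHash x := by
  simp [hbHash, pvHash, beq_iff_eq]

theorem hb_step (i mask p : Nat) : hbStep i mask p = pvNextI i mask p := by
  unfold hbStep pvNextI
  congr 1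
  ring

theorem hb_shift (i m : Nat) :
    (List.range (m + 1)).map (fun j => i + j + 1)
      = (i + 1) :: (List.range m).map (fun j => (i + 1) + j + 1) := by
  rw [List.range_succ_eq_map, List.map_cons, List.map_map]
  exact congrArg₂ _ (by omega)
    (List.map_congr_left fun j _ => by simp only [Function.comp_apply]; omega)

theorem hb_runAdd (t : List (Option Int)) (x : Int) :
    ∀ n i, hbRunAdd t x i (n + 1)
      = pvScanSlots t x (i :: (List.range n).map (fun j => i + j + 1)) := by
  intro n
  induction n with
  | zero =>
    intro i
    show hbRunAdd t x i 1 = pvScanSlots t x [i]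
    unfold hbRunAdd hbAt pvScanSlots
    cases t[i]? with
    | none => simp [hbRunAdd, pvScanSlots]
    | some o => cases o with
      | none => simp
      | some k => by_cases hk : k == x <;> simp [hk, pvScanSlots, hbRunAdd]
  | succ m ih =>
    intro i
    unfold hbRunAdd hbAt pvScanSlots
    rw [hb_shift, ← ih (i + 1)]
    cases t[i]? with
    | none => simp
    | some o => cases o with
      | none => simp
      | some k => by_cases hk : k == x <;> simp [hk]

theorem hb_runEmpty (t : List (Option Int)) :
    ∀ n i, hbRunEmpty t i (n + 1)
      = pvCleanScan t (i :: (List.range n).map (fun j => i + j + 1)) := by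
  intro n
  induction n with
  | zero =>
    intro i
    show hbRunEmpty t i 1 = pvCleanScan t [i]
    unfold hbRunEmpty hbAt pvCleanScan
    rw [List.getD_eq_getElem?_getD]
    cases t[i]? with
    | none => simp [hbRunEmpty, pvCleanScan]
    | some o => cases o with
      | none => simp
      | some k => simp [hbRunEmpty, pvCleanScan]
  | succ m ih =>
    intro i
    unfold hbRunEmpty hbAt pvCleanScan
    rw [hb_shift, ← ih (i + 1), List.getD_eq_getElem?_getD]
    cases t[i]? with
    | none => simp
    | some o => cases o with
      | none => simp
      | some k => simp

theorem hb_runAdd_lin (t : List (Option Int)) (mask : Nat) (x : Int) (i : Nat) :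
    hbRunAdd t x i (if i + 9 ≤ mask then 10 else 1) = pvScanSlots t x (pvLinSlots i mask) := by
  unfold pvLinSlots
  by_cases h : i + 9 ≤ mask
  · rw [if_pos h, if_pos h, hb_runAdd]
  · rw [if_neg h, if_neg h]
    exact hb_runAdd t x 0 i

theorem hb_runEmpty_lin (t : List (Option Int)) (mask : Nat) (i : Nat) :
    hbRunEmpty t i (if i + 9 ≤ mask then 10 else 1) = pvCleanScan t (pvLinSlots i mask) := by
  unfold pvLinSlots
  by_cases h : i + 9 ≤ mask
  · rw [if_pos h, if_pos h, hb_runEmpty]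
  · rw [if_neg h, if_neg h]
    exact hb_runEmpty t 0 i

theorem hb_findAdd (t : List (Option Int)) (mask : Nat) (x : Int) :
    ∀ f i p, hbFindAdd t mask x f i p = pvAddFind t mask x i p f := by
  intro f
  induction f with
  | zero => intro i p; rfl
  | succ g ih =>
    intro i p
    unfold hbFindAdd pvAddFind
    rw [hb_runAdd_lin, hb_step, ih]
    cases pvScanSlots t x (pvLinSlots i mask) with
    | some r => rfl
    | none => rfl

theorem hb_findEmpty (t : List (Option Int)) (mask : Nat) :
    ∀ f i p, hbFindEmpty t mask f i p = pvCleanFind t mask i p f := by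
  intro f
  induction f with
  | zero => intro i p; rfl
  | succ g ih =>
    intro i p
    unfold hbFindEmpty pvCleanFind
    rw [hb_runEmpty_lin, hb_step, ih]
    cases pvCleanScan t (pvLinSlots i mask) with
    | some r => rfl
    | none => rfl

theorem hb_place (x : Int) : ∀ t, hbPlace x t = pvFallback t x := by
  intro t
  induction t with
  | nil => rfl
  | cons o r ih =>
    cases o with
    | none => simp [hbPlace, pvFallback, List.findIdx?_cons]
    | some k =>
      simp only [hbPlace, pvFallback, List.findIdx?_cons]
      norm_num
      unfold pvFallback at ih
      cases hf : (r.findIdx? (· = none)) with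
      | none => rw [hf] at ih; simp [ih]
      | some e => rw [hf] at ih; simp [← ih]

theorem hb_clean (t : List (Option Int)) (mask : Nat) (x : Int) :
    hbClean t mask x = pvInsertClean t mask x := by
  unfold hbClean pvInsertClean pvIdx0 pvPerturb0
  have h64 : (18446744073709551616 : Int) = 2 ^ 64 := by norm_num
  rw [hb_hash, h64, hb_findEmpty]
  cases pvCleanFind t mask ((pvHash x % ((mask : Int) + 1)).toNat) ((pvHash x % (2 ^ 64 : Int)).toNat) (mask + 80) with
  | some e => rfl
  | none => exact hb_place x t

theorem hb_newSize (m : Nat) : ∀ f cur, hbNewSize m cur f = pvGrow cur m f := by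
  intro f
  induction f with
  | zero => intro cur; rfl
  | succ g ih =>
    intro cur
    unfold hbNewSize pvGrow
    by_cases h : cur ≤ m
    · rw [if_neg (by omega), if_pos h, ih]
    · rw [if_pos (by omega), if_neg h]

theorem hb_fold_clean (m : Nat) (l : List Int) : ∀ tb : List (Option Int),
    l.foldl (fun tb k => hbClean tb m k) tb = l.foldl (fun tb k => pvInsertClean tb m k) tb := by
  induction l with
  | nil => intro tb; rfl
  | cons k r ih => intro tb; rw [List.foldl_cons, List.foldl_cons, hb_clean, ih]

-- the tuple B's model carries for a set object s is (s.table, s.mask, s.used, s.fill)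
def hbOf (s : PvSetObj) : List (Option Int) × Nat × Nat × Nat :=
  (s.table, s.mask, s.used, s.fill)

theorem hb_resize (s : PvSetObj) (m : Nat) : hbResize (hbOf s) m = hbOf (pvResize s m) := by
  unfold hbResize pvResize hbOf pvIterOrder
  simp only [hb_newSize]
  congr 1
  exact hb_fold_clean _ _ _

theorem hb_add (s : PvSetObj) (x : Int) : hbAdd (hbOf s) x = hbOf (pvAddKey s x) := by
  unfold hbAdd pvAddKey hbOf pvIdx0 pvPerturb0
  have h64 : (18446744073709551616 : Int) = 2 ^ 64 := by norm_num
  simp only [hb_hash, h64, hb_findAdd]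
  cases pvAddFind s.table s.mask x ((pvHash x % ((s.mask : Int) + 1)).toNat) ((pvHash x % (2 ^ 64 : Int)).toNat)
      (s.mask + 80) with
  | none =>
    simp only [Option.elim_none]
    by_cases h : (some x) ∈ s.table <;>
      simp [h, hb_place]
  | some r =>
    cases r with
    | none => rfl
    | some e =>
      simp only [Option.elim_some, ge_iff_le]
      by_cases h : s.mask * 3 ≤ (s.fill + 1) * 5
      · rw [if_pos h, if_pos h]
        exact hb_resize ⟨s.mask, s.table.set e (some x), s.fill + 1, s.used + 1⟩ _
      · rw [if_neg h, if_neg h]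

theorem hb_fold_add (l : List Int) : ∀ (s : PvSetObj),
    l.foldl hbAdd (hbOf s) = hbOf (l.foldl pvAddKey s) := by
  induction l with
  | nil => intro s; rfl
  | cons x r ih => intro s; rw [List.foldl_cons, List.foldl_cons, hb_add, ih]

theorem hb_from (xs : List Int) : hbFrom xs = hbOf (pvSetFromList xs) := by
  unfold hbFrom pvSetFromList
  exact hb_fold_add xs pvEmptySet

theorem hb_merge (s o : PvSetObj) : hbMerge (hbOf s) (hbOf o) = hbOf (pvMergeSet s o) := by
  obtain ⟨sm, st, sf, su⟩ := s
  obtain ⟨om, ot, of', ou⟩ := o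
  dsimp only [hbMerge, pvMergeSet, hbOf, ge_iff_le]
  have hres : (if sm * 3 ≤ (sf + ou) * 5 then hbResize (st, sm, su, sf) ((su + ou) * 2)
        else (st, sm, su, sf))
      = hbOf (if sm * 3 ≤ (sf + ou) * 5
          then pvResize ⟨sm, st, sf, su⟩ ((su + ou) * 2) else ⟨sm, st, sf, su⟩) := by
    by_cases h : sm * 3 ≤ (sf + ou) * 5
    · rw [if_pos h, if_pos h]
      exact hb_resize ⟨sm, st, sf, su⟩ _
    · rw [if_neg h, if_neg h]
      rfl
  rw [hres]
  generalize (if sm * 3 ≤ (sf + ou) * 5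
      then pvResize ⟨sm, st, sf, su⟩ ((su + ou) * 2) else ⟨sm, st, sf, su⟩) = s'
  dsimp only [hbOf]
  by_cases h1 : s'.fill = 0
  · by_cases h2 : s'.mask = om
    · simp only [h1, h2, and_self, if_true, beq_self_eq_true, cond_true]
    · have hb2 : (s'.mask == om) = false := by simpa using h2
      simp only [h1, hb2, cond_false, true_and, if_true]
      rw [if_neg h2, hb_fold_clean]
      rfl
  · have hc : ¬ (s'.fill = 0 ∧ s'.mask = om) := fun hcc => h1 hcc.1
    simp only [h1, if_false]
    exact hb_fold_add _ _

theorem hb_union (a b : List Int) : hbUnion a b = pvUnionOrder a b := by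
  unfold hbUnion pvUnionOrder
  have he : (List.replicate 8 (none : Option Int), 7, 0, 0) = hbOf pvEmptySet := rfl
  rw [he, hb_from, hb_merge, hb_from, hb_merge]
  rfl


-- ---- generic list helpers ----

theorem pv_any_congr {α : Type} (l : List α) (p q : α → Bool)
    (H : ∀ x ∈ l, p x = q x) : l.any p = l.any q := by
  induction l with
  | nil => rfl
  | cons a t ih =>
    rw [List.any_cons, List.any_cons, H a List.mem_cons_self,
      ih (fun x hx => H x (List.mem_cons_of_mem a hx))]

theorem pv_any_isSome {α β : Type} (l : List α) (f : α → Option β) :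
    (l.any fun x => (f x).isSome) = (l.findSome? f).isSome := by
  induction l with
  | nil => simp
  | cons a t ih =>
    rw [List.any_cons, List.findSome?_cons]
    cases h : f a with
    | some v => simp
    | none => simp; exact ih

theorem pv_findSome_congr {α β : Type} (l : List α) (f g : α → Option β)
    (H : ∀ x ∈ l, f x = g x) : l.findSome? f = l.findSome? g := by
  induction l with
  | nil => rfl
  | cons a t ih =>
    rw [List.findSome?_cons, List.findSome?_cons, H a List.mem_cons_self]
    cases g a with
    | some v => rfl
    | none => exact ih (fun x hx => H x (List.mem_cons_of_mem a hx))

theorem pv_findSome_ite {α β : Type} (l : List α) (q : α → Bool) (g : α → β) :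
    l.findSome? (fun x => if q x then some (g x) else none) = (l.find? q).map g := by
  induction l with
  | nil => rfl
  | cons a t ih =>
    rw [List.findSome?_cons, List.find?_cons]
    by_cases hq : q a
    · simp [hq]
    · simp only [hq, Bool.false_eq_true, if_false]
      exact ih

theorem pv_findSome_pair {α β γ : Type} (l : List α) (h : α → Option β) (k : α → β → γ) :
    l.findSome? (fun a => (h a).map (k a))
      = (l.findSome? (fun a => (h a).map (fun p => (a, p)))).map (fun x => k x.1 x.2) := by
  induction l with
  | nil => rfl
  | cons a t ih =>
    rw [List.findSome?_cons, List.findSome?_cons]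
    cases ha : h a with
    | some p => rfl
    | none => simpa using ih

-- ---- enumerate facts ----

theorem pv_enumerate_pyGetD (keys : List (List Int)) (x : Int × List Int)
    (h : x ∈ PySem.List.enumerate keys) :
    0 ≤ x.1 ∧ x.1 < keys.length ∧ PySem.List.pyGetD keys x.1 [] = x.2 := by
  rcases (PySem.List.mem_enumerate_iff _ _ _).mp h with ⟨n, hn, rfl⟩
  refine ⟨by simp, by simpa using hn, ?_⟩
  rw [PySem.List.pyGetD_eq_getElem keys [] (by simp) (by simpa using hn)]
  simp

-- ---- the intersection test and the pair searches ----

theorem pvSetAnd_iff (t u : List Int) : pvSetAnd t u = true ↔ ∃ e, e ∈ t ∧ e ∈ u := by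
  unfold pvSetAnd
  rw [bne_iff_ne]
  constructor
  · intro h
    rcases List.exists_mem_of_ne_nil _ h with ⟨e, he⟩
    have h1 := (PySem.Set.mem_inter (PySem.Set.ofList t) (PySem.Set.ofList u) e).mp he
    exact ⟨e, (PySem.Set.mem_ofList _ _).mp h1.1, (PySem.Set.mem_ofList _ _).mp h1.2⟩
  · rintro ⟨e, het, heu⟩
    exact List.ne_nil_of_mem
      ((PySem.Set.mem_inter _ _ _).mpr
        ⟨(PySem.Set.mem_ofList _ _).mpr het, (PySem.Set.mem_ofList _ _).mpr heu⟩)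

theorem pv_intersecting_eq (keys : List (List Int)) :
    intersecting_tuples keys = (pvFindPairA keys).isSome := by
  unfold intersecting_tuples pvFindPairA
  rw [← pv_any_isSome]
  apply pv_any_congr
  intro x hx
  rw [← pv_any_isSome]
  apply pv_any_congr
  intro y hy
  cases h : pvSetAnd x.2 y.2 && x.1 != y.1 <;> simp

-- ---- the element→positions index bOcc ----

theorem pv_add_add (s : PySem.Set Int) (x : Int) :
    PySem.Set.add (PySem.Set.add s x) x = PySem.Set.add s x := by
  rw [PySem.Set.add_of_mem (by rw [PySem.Set.mem_add]; exact Or.inr rfl)]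

theorem pv_occ_fold (g : PySem.Set Int → PySem.Set Int) (hgg : ∀ s, g (g s) = g s) :
    ∀ (l : List Int) (occ : PySem.Dict Int (PySem.Set Int)) (e' : Int),
      ((l.foldl (fun o e => o.insert e (g (o.getD e []))) occ).getD e' [])
        = if e' ∈ l then g (occ.getD e' []) else occ.getD e' [] := by
  intro l
  induction l with
  | nil => intro occ e'; simp
  | cons e t ih =>
    intro occ e'
    rw [List.foldl_cons, ih]
    simp only [PySem.Dict.getD_insert]
    by_cases hee : e' = e
    · subst hee
      simp only [List.mem_cons_self, if_true]
      by_cases het : e' ∈ t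
      · rw [if_pos het, hgg]
      · rw [if_neg het]
    · have hcons : (e' ∈ e :: t) ↔ e' ∈ t := by simp [hee]
      simp only [if_neg hee]
      by_cases het : e' ∈ t
      · rw [if_pos het, if_pos (hcons.mpr het)]
      · rw [if_neg het, if_neg (fun hh => het (hcons.mp hh))]

theorem pv_occ_build (L : List (Int × List Int)) :
    ∀ occ : PySem.Dict Int (PySem.Set Int), (∀ e, (occ.getD e []).Nodup) →
      (∀ e, ((L.foldl (fun o ik =>
          ik.2.foldl (fun o e => o.insert e (PySem.Set.add (o.getD e []) ik.1)) o)
          occ).getD e []).Nodup) ∧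
      (∀ e x, x ∈ (L.foldl (fun o ik =>
          ik.2.foldl (fun o e => o.insert e (PySem.Set.add (o.getD e []) ik.1)) o)
          occ).getD e []
        ↔ x ∈ occ.getD e [] ∨ ∃ ik ∈ L, ik.1 = x ∧ e ∈ ik.2) := by
  induction L with
  | nil => intro occ hnd; exact ⟨hnd, by simp⟩
  | cons ik T ih =>
    intro occ hnd
    simp only [List.foldl_cons]
    have hstep : ∀ e, ((ik.2.foldl (fun o e => o.insert e (PySem.Set.add (o.getD e []) ik.1)) occ).getD e [])
        = if e ∈ ik.2 then PySem.Set.add (occ.getD e []) ik.1 else occ.getD e [] :=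
      fun e => pv_occ_fold (fun s => PySem.Set.add s ik.1) (fun s => pv_add_add s ik.1) ik.2 occ e
    have hnd' : ∀ e, ((ik.2.foldl (fun o e => o.insert e (PySem.Set.add (o.getD e []) ik.1)) occ).getD e []).Nodup := by
      intro e; rw [hstep e]
      by_cases he : e ∈ ik.2
      · rw [if_pos he]; exact PySem.Set.nodup_add _ _ (hnd e)
      · rw [if_neg he]; exact hnd e
    obtain ⟨h1, h2⟩ := ih _ hnd'
    refine ⟨h1, ?_⟩
    intro e x
    rw [h2 e x, hstep e]
    by_cases he : e ∈ ik.2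
    · rw [if_pos he, PySem.Set.mem_add]
      constructor
      · rintro ((hx | rfl) | hx)
        · exact Or.inl hx
        · exact Or.inr ⟨ik, List.mem_cons_self, rfl, he⟩
        · exact Or.inr ⟨hx.choose, List.mem_cons_of_mem _ hx.choose_spec.1, hx.choose_spec.2⟩
      · rintro (hx | ⟨p, hp, rfl, hep⟩)
        · exact Or.inl (Or.inl hx)
        · rcases List.mem_cons.mp hp with rfl | hp
          · exact Or.inl (Or.inr rfl)
          · exact Or.inr ⟨p, hp, rfl, hep⟩
    · rw [if_neg he]
      constructor
      · rintro (hx | ⟨p, hp, rfl, hep⟩)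
        · exact Or.inl hx
        · exact Or.inr ⟨p, List.mem_cons_of_mem _ hp, rfl, hep⟩
      · rintro (hx | ⟨p, hp, rfl, hep⟩)
        · exact Or.inl hx
        · rcases List.mem_cons.mp hp with rfl | hp
          · exact absurd hep he
          · exact Or.inr ⟨p, hp, rfl, hep⟩

theorem pv_occ_char (keys : List (List Int)) (e x : Int) :
    x ∈ (bOcc keys).getD e []
      ↔ ∃ p ∈ PySem.List.enumerate keys, p.1 = x ∧ e ∈ p.2 := by
  unfold bOcc
  rw [(pv_occ_build (PySem.List.enumerate keys) PySem.Dict.empty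
        (fun e => by simp [PySem.Dict.getD_empty])).2 e x]
  simp [PySem.Dict.getD_empty]

-- ---- first satisfying pair vs minimum of all partners ----

theorem pv_find_min_zip (q : Int × List Int → Bool) (P : List (Int × List Int))
    (hasc : P.Pairwise (fun p r => p.1 < r.1)) (S : List Int)
    (hmem : ∀ x, x ∈ S ↔ ∃ p ∈ P, p.1 = x ∧ q p = true) :
    (match P.find? q with
     | none => S = []
     | some p₀ => PySem.List.min? S (fun x => x) = some p₀.1) := by
  cases hf : P.find? q with
  | none =>
    have hall := List.find?_eq_none.mp hf
    cases hS : S with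
    | nil => rfl
    | cons x t =>
      exfalso
      rcases (hmem x).mp (by rw [hS]; exact List.mem_cons_self) with ⟨p, hp, _, hq⟩
      exact absurd hq (by simpa using hall p hp)
  | some p₀ =>
    rcases List.find?_eq_some_iff_append.mp hf with ⟨hq0, l₁, l₂, hPeq, hfail⟩
    have hp0S : p₀.1 ∈ S := (hmem p₀.1).mpr ⟨p₀, by rw [hPeq]; simp, rfl, hq0⟩
    have hlb : ∀ x ∈ S, p₀.1 ≤ x := by
      intro x hx
      rcases (hmem x).mp hx with ⟨p, hp, rfl, hq⟩
      rw [hPeq] at hp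
      rcases List.mem_append.mp hp with hp1 | hp2
      · exact absurd hq (by simpa using hfail p hp1)
      · rcases List.mem_cons.mp hp2 with rfl | hp3
        · exact le_refl _
        · have hlt : p₀.1 < p.1 := by
            rw [hPeq] at hasc
            exact (List.pairwise_cons.mp (List.pairwise_append.mp hasc).2.1).1 p hp3
          omega
    cases hm : PySem.List.min? S (fun x => x) with
    | none =>
      rw [PySem.List.min?_eq_none_iff] at hm
      rw [hm] at hp0S; simp at hp0S
    | some m =>
      have hmmem := PySem.List.min?_mem hm
      have hmin := PySem.List.min?_isMin hm
      have h1 : p₀.1 ≤ m := hlb m hmmem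
      have h2 : m ≤ p₀.1 := hmin p₀.1 hp0S
      rw [le_antisymm h2 h1]

-- ---- the two pair searches agree ----

def pvQ (ik ju : Int × List Int) : Bool := pvSetAnd ik.2 ju.2 && ik.1 != ju.1

def pvCentral (keys : List (List Int)) : Option ((Int × List Int) × (Int × List Int)) :=
  (PySem.List.enumerate keys).findSome? (fun ik =>
    ((PySem.List.enumerate keys).find? (pvQ ik)).map (fun p => (ik, p)))

theorem pv_partners_mem (keys : List (List Int)) (ik : Int × List Int) (x : Int) :
    x ∈ ik.2.flatMap (fun e => ((bOcc keys).getD e []).filter (fun j => j != ik.1))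
      ↔ ∃ p ∈ PySem.List.enumerate keys, p.1 = x ∧ pvQ ik p = true := by
  rw [List.mem_flatMap]
  constructor
  · rintro ⟨e, he, hx⟩
    rw [List.mem_filter] at hx
    rcases (pv_occ_char keys e x).mp hx.1 with ⟨p, hp, rfl, hep⟩
    refine ⟨p, hp, rfl, ?_⟩
    unfold pvQ
    rw [Bool.and_eq_true, bne_iff_ne]
    exact ⟨(pvSetAnd_iff _ _).mpr ⟨e, he, hep⟩, fun hh => (bne_iff_ne.mp hx.2) hh.symm⟩
  · rintro ⟨p, hp, rfl, hq⟩
    unfold pvQ at hq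
    rw [Bool.and_eq_true, bne_iff_ne] at hq
    rcases (pvSetAnd_iff _ _).mp hq.1 with ⟨e, he, hep⟩
    refine ⟨e, he, ?_⟩
    rw [List.mem_filter]
    exact ⟨(pv_occ_char keys e p.1).mpr ⟨p, hp, rfl, hep⟩, bne_iff_ne.mpr (fun hh => hq.2 hh.symm)⟩

theorem pv_findPairA_central (keys : List (List Int)) :
    pvFindPairA keys = (pvCentral keys).map (fun x => (x.1.2, x.2.2)) := by
  unfold pvCentral
  have h1 : pvFindPairA keys = (PySem.List.enumerate keys).findSome? (fun ik =>
      ((PySem.List.enumerate keys).find? (pvQ ik)).map (fun ju => (ik.2, ju.2))) := by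
    unfold pvFindPairA
    apply pv_findSome_congr
    intro ik _
    exact pv_findSome_ite (PySem.List.enumerate keys) (pvQ ik) (fun ju => (ik.2, ju.2))
  rw [h1, pv_findSome_pair]

theorem pv_innerB (keys : List (List Int)) (ik : Int × List Int) :
    (if (ik.2.flatMap (fun e => ((bOcc keys).getD e []).filter (fun j => j != ik.1))).isEmpty
     then none
     else some (ik.1, (PySem.List.min? (ik.2.flatMap (fun e =>
            ((bOcc keys).getD e []).filter (fun j => j != ik.1))) (fun x => x)).getD 0))
      = ((PySem.List.enumerate keys).find? (pvQ ik)).map (fun p => (ik.1, p.1)) := by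
  have hz := pv_find_min_zip (pvQ ik) (PySem.List.enumerate keys)
    (PySem.List.pairwise_lt_enumerate keys 0)
    (ik.2.flatMap (fun e => ((bOcc keys).getD e []).filter (fun j => j != ik.1)))
    (pv_partners_mem keys ik)
  cases hf : (PySem.List.enumerate keys).find? (pvQ ik) with
  | none =>
    rw [hf] at hz
    simp [hz]
  | some p₀ =>
    rw [hf] at hz
    have hne : ¬ (ik.2.flatMap (fun e => ((bOcc keys).getD e []).filter (fun j => j != ik.1))).isEmpty = true := by
      rw [List.isEmpty_iff]
      intro hnil
      rw [hnil] at hz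
      exact absurd (PySem.List.min?_mem hz) (List.not_mem_nil)
    rw [if_neg hne, hz]
    rfl

theorem pv_findPairB_central (keys : List (List Int)) :
    bFindPair keys = (pvCentral keys).map (fun x => (x.1.1, x.2.1)) := by
  unfold pvCentral
  have h1 : bFindPair keys = (PySem.List.enumerate keys).findSome? (fun ik =>
      ((PySem.List.enumerate keys).find? (pvQ ik)).map (fun p => (ik.1, p.1))) := by
    show (PySem.List.enumerate keys).findSome? (fun ik =>
        if (ik.2.flatMap (fun e => ((bOcc keys).getD e []).filter (fun j => j != ik.1))).isEmpty
        then none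
        else some (ik.1, (PySem.List.min? (ik.2.flatMap (fun e =>
               ((bOcc keys).getD e []).filter (fun j => j != ik.1))) (fun x => x)).getD 0)) = _
    exact pv_findSome_congr _ _ _ (fun ik _ => pv_innerB keys ik)
  rw [h1, pv_findSome_pair]

theorem pv_central_some (keys : List (List Int)) (x : (Int × List Int) × (Int × List Int))
    (h : pvCentral keys = some x) :
    x.1 ∈ PySem.List.enumerate keys ∧ x.2 ∈ PySem.List.enumerate keys ∧ x.1.1 ≠ x.2.1 := by
  unfold pvCentral at h
  rcases List.exists_of_findSome?_eq_some h with ⟨ik, hik, hmap⟩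
  cases hf : (PySem.List.enumerate keys).find? (pvQ ik) with
  | none => rw [hf] at hmap; simp at hmap
  | some p =>
    rw [hf] at hmap
    simp only [Option.map_some, Option.some_inj] at hmap
    subst hmap
    have hq := List.find?_some hf
    unfold pvQ at hq
    rw [Bool.and_eq_true, bne_iff_ne] at hq
    exact ⟨hik, List.mem_of_find?_eq_some hf, hq.2⟩

-- ---- dict facts ----

theorem pv_get?_erase_of_ne (d : PySem.Dict (List Int) Int) (a b : List Int) (h : ¬ b = a) :
    (d.erase a).get? b = d.get? b := by
  simp only [PySem.Dict.erase, PySem.Dict.get?]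
  rw [List.find?_filter]
  have hfind : ∀ l : List (List Int × Int),
      List.find? (fun p => decide (((!(p.1 == a)) = true) ∧ ((p.1 == b) = true))) l
        = List.find? (fun p => p.1 == b) l := by
    intro l
    induction l with
    | nil => rfl
    | cons x t ih =>
      by_cases hb : (x.1 == b) = true
      · have hx : x.1 = b := by simpa using hb
        simp [hx, h]
      · have hxb : x.1 ≠ b := by simpa using hb
        simp [hxb]
        simpa using ih
  rw [hfind]

theorem pv_nodup_keys_erase (d : PySem.Dict (List Int) Int) (a : List Int)
    (h : d.keys.Nodup) : (d.erase a).keys.Nodup := by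
  have hsub : (d.erase a).keys.Sublist d.keys := by
    simp only [PySem.Dict.keys, PySem.Dict.erase]
    exact List.Sublist.map _ List.filter_sublist
  exact h.sublist hsub

-- ---- the loops agree ----

theorem pv_loop_eq : ∀ (fuel : Nat) (d : PySem.Dict (List Int) Int),
    d.keys.Nodup → pvALoop fuel d = pvBLoop fuel d := by
  intro fuel
  induction fuel with
  | zero => intro d _; rfl
  | succ n ih =>
    intro d hnd
    unfold pvALoop pvBLoop
    simp only []
    rw [pv_intersecting_eq, pv_findPairA_central, pv_findPairB_central]
    cases hc : pvCentral d.keys with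
    | none => simp
    | some x =>
      obtain ⟨⟨i, k⟩, ⟨j, u⟩⟩ := x
      obtain ⟨hik, hju, hij⟩ := pv_central_some d.keys _ hc
      obtain ⟨hi0, hilt, hkey_i⟩ := pv_enumerate_pyGetD d.keys _ hik
      obtain ⟨hj0, hjlt, hkey_j⟩ := pv_enumerate_pyGetD d.keys _ hju
      dsimp only at hi0 hilt hkey_i hj0 hjlt hkey_j hij
      simp only [Option.map_some, Option.isSome_some, if_true]
      have hku : k ≠ u := by
        intro hh
        apply hij
        rw [← hkey_i, ← hkey_j] at hh
        rw [PySem.List.pyGetD_eq_getElem d.keys [] hi0 (by simpa using hilt)] at hh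
        rw [PySem.List.pyGetD_eq_getElem d.keys [] hj0 (by simpa using hjlt)] at hh
        have := (List.Nodup.getElem_inj_iff hnd).mp hh
        omega
      simp only [hkey_i, hkey_j]
      rw [pv_get?_erase_of_ne d k u (fun hh => hku hh.symm), hb_union]
      apply ih
      exact PySem.Dict.nodup_keys_insert _ _ _
        (pv_nodup_keys_erase _ u (pv_nodup_keys_erase _ k hnd))

-- ===== VERDICT (by name: the statement is the Claim_ definition above) =====
theorem dict_merge_intersecting_spec : Claim_equal_dict_merge_intersecting := by
  intro org_dict _hdom hpre
  unfold Spec_dict_merge_intersecting dict_merge_intersecting dict_merge_intersecting_alt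
  rw [pv_loop_eq]
  simpa [PySem.Dict.keys] using hpre
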